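-- pv_equiv track=rewrite | github.com/dalamudx/ReleaseTracker | backend/src/releasetracker/executors/portainer.py | _resolve_stack_image
-- ===== SOURCE A (Python) =====
-- def _resolve_stack_image(service_metadata: list[dict[str, str | None]]) -> str | None:
--     images = {
--         item.get("image")
--         for item in service_metadata
--         if isinstance(item.get("image"), str) and item.get("image")
--     }
--     if len(images) != 1:
--         return None
--     return next(iter(images))
-- ===== SOURCE B (Python) =====
-- def _resolve_stack_image(service_metadata):
--     candidate = None
--     seen = False
--     for item in service_metadata:
--         img = item.get("image")
--         if not (isinstance(img, str) and img):
--             continue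
--         if not seen:
--             candidate = img
--             seen = True
--         elif img != candidate:
--             return None
--     return candidate if seen else None
-- ===== Notes on version B (the rewrite author's own statement) =====
-- stated objective: simpler
-- what changed: Replaces the set comprehension + cardinality check with a single forward loop keeping a scalar candidate and a seen flag, returning None immediately when a second distinct valid image appears.
import Mathlib
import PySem

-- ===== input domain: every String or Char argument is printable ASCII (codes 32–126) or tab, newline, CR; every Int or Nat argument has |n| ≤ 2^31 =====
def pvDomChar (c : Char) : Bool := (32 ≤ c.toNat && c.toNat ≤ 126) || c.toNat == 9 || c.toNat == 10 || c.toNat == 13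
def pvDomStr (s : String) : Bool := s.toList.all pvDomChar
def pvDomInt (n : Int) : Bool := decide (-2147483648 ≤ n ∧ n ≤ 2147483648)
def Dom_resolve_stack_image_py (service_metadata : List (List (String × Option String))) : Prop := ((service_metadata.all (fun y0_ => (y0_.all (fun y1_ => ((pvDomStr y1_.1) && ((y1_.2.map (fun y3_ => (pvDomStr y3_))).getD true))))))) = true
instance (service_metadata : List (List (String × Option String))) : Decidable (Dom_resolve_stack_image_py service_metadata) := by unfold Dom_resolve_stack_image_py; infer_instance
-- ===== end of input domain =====

-- B replaces the set comprehension + cardinality check by a single pass with a scalar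
-- candidate and a seen flag, bailing out early on a second distinct valid image (objective: simpler).

-- ===== PORT A =====
-- item.get("image"): first-match lookup in the association list (Python dict.get)
def pvImgGet (item : List (String × Option String)) : Option (Option String) :=
  (PySem.Dict.mk item).get? "image"

-- the set-comprehension filter: keep item.get("image") iff it is a non-empty str
def pvValid (item : List (String × Option String)) : Option String :=
  match pvImgGet item with
  | some (some s) => if s ≠ "" then some s else none
  | _ => none

def resolve_stack_image_py (service_metadata : List (List (String × Option String))) : Option String :=
  let images : PySem.Set String := PySem.Set.ofList (service_metadata.filterMap pvValid)
  if images.length ≠ 1 then none else images[0]?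

-- ===== PORT B =====
def pvAltLoop (sm : List (List (String × Option String))) (candidate : Option String) (seen : Bool) : Option String :=
  match sm with
  | [] => if seen then candidate else none
  | item :: rest =>
    match pvValid item with
    | none => pvAltLoop rest candidate seen
    | some s =>
      if !seen then pvAltLoop rest (some s) true
      else if some s ≠ candidate then none
      else pvAltLoop rest candidate seen

def resolve_stack_image_py_alt (service_metadata : List (List (String × Option String))) : Option String :=
  pvAltLoop service_metadata none false

-- ===== PRECONDITION & SPEC =====
def Spec_resolve_stack_image_py (service_metadata : List (List (String × Option String))) (out : Option String) : Prop := out = resolve_stack_image_py_alt service_metadata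
instance (service_metadata : List (List (String × Option String))) (out : Option String) : Decidable (Spec_resolve_stack_image_py service_metadata out) := by unfold Spec_resolve_stack_image_py; infer_instance

-- ===== CLAIM (what is proved, stated in full; the proofs are below) =====
def Claim_equal_resolve_stack_image_py : Prop := ∀ (service_metadata : List (List (String × Option String))), Dom_resolve_stack_image_py service_metadata → Spec_resolve_stack_image_py service_metadata (resolve_stack_image_py service_metadata)

-- ===== LEMMAS AND PROOFS =====

-- the B loop, expressed on the list of valid images only
def pvLoop' (vs : List String) (candidate : Option String) (seen : Bool) : Option String :=
  match vs with
  | [] => if seen then candidate else none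
  | s :: rest =>
    if !seen then pvLoop' rest (some s) true
    else if some s ≠ candidate then none
    else pvLoop' rest candidate seen

lemma pvAltLoop_eq_loop' (sm : List (List (String × Option String))) (c : Option String) (b : Bool) :
    pvAltLoop sm c b = pvLoop' (sm.filterMap pvValid) c b := by
  induction sm generalizing c b with
  | nil => rfl
  | cons item rest ih =>
    simp only [pvAltLoop, List.filterMap_cons]
    cases pvValid item with
    | none => exact ih c b
    | some s =>
      simp only [pvLoop']
      by_cases hb : b
      · simp only [hb, Bool.not_true, Bool.false_eq_true, if_false]
        split_ifs with h
        · rfl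
        · exact ih c true
      · simp [hb, ih]

-- running tail of the loop once seen: result is v iff the rest all equal v
lemma pvLoop'_seen (vs : List String) (v : String) :
    pvLoop' vs (some v) true = if vs.all (· == v) then some v else none := by
  induction vs with
  | nil => rfl
  | cons s rest ih =>
    simp only [pvLoop', List.all_cons]
    by_cases h : s = v
    · simp [h, ih]
    · simp [h]

-- A's result characterised on the valid-image list
lemma pvA_char (vs : List String) :
    (let images : PySem.Set String := PySem.Set.ofList vs
     if images.length ≠ 1 then (none : Option String) else images[0]?) =
    match vs with
    | [] => none
    | v :: rest => if rest.all (· == v) then some v else none := by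
  cases vs with
  | nil => simp [PySem.Set.ofList]
  | cons v rest =>
    simp only []
    by_cases h : rest.all (· == v)
    · have : PySem.Set.ofList (v :: rest) = [v] := by
        have hall : ∀ x ∈ rest, x = v := by
          intro x hx
          have := List.all_eq_true.mp h x hx
          simpa using this
        clear h
        induction rest with
        | nil => rfl
        | cons a tl ih =>
          have ha : a = v := hall a (by simp)
          have htl : ∀ x ∈ tl, x = v := fun x hx => hall x (by simp [hx])
          have h1 : PySem.Set.ofList (v :: a :: tl) = PySem.Set.ofList (v :: tl) := by
            simp [PySem.Set.ofList, PySem.Set.add, PySem.Set.contains, ha]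
          rw [h1, ih htl]
      simp [h, this]
    · -- some element of rest differs from v, so the set has ≥ 2 elements
      have : 2 ≤ (PySem.Set.ofList (v :: rest)).length := by
        obtain ⟨x, hx, hxv⟩ : ∃ x ∈ rest, x ≠ v := by
          by_contra hc
          push Not at hc
          exact h (List.all_eq_true.mpr fun x hx => by simpa using hc x hx)
        have hv : v ∈ PySem.Set.ofList (v :: rest) := by
          rw [← PySem.List.dedup_eq_ofList]; simp
        have hxmem : x ∈ PySem.Set.ofList (v :: rest) := by
          rw [← PySem.List.dedup_eq_ofList]; simp [hx]
        have hnd : (PySem.Set.ofList (v :: rest)).Nodup := by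
          rw [← PySem.List.dedup_eq_ofList]; exact PySem.List.nodup_dedup _
        by_contra hlen
        push Not at hlen
        interval_cases hl : (PySem.Set.ofList (v :: rest)).length
        · simp [List.length_eq_zero_iff.mp hl] at hv
        · obtain ⟨a, ha⟩ := List.length_eq_one_iff.mp hl
          rw [ha] at hv hxmem
          simp at hv hxmem
          exact hxv (hxmem.trans hv.symm)
      simp [h]
      intro hlen
      omega
  
-- ===== VERDICT (by name: the statement is the Claim_ definition above) =====
theorem resolve_stack_image_py_spec : Claim_equal_resolve_stack_image_py := by
  intro sm _
  unfold Spec_resolve_stack_image_py resolve_stack_image_py resolve_stack_image_py_alt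
  rw [pvAltLoop_eq_loop', pvA_char]
  cases h : sm.filterMap pvValid with
  | nil => rfl
  | cons v rest => simp [pvLoop', pvLoop'_seen]
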